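-- pv_equiv track=rewrite | github.com/PaulC61/Cheminformatics | M1/Algo_Prog/Exam Solutions/Exam2017paul.py | total_weight
-- ===== SOURCE A (Python) =====
-- def total_weight(ingLst):
--     weight = 0
--     volume = 0
--     quant = 0
--     for i in range(len(ingLst)):
--         if ingLst[i][2] == "kg":
--             weight += ingLst[i][1]
--         elif ingLst[i][2] == "mL":
--             volume +=ingLst[i][1]
--         else:
--             quant += ingLst[i][1]
--
--     return "Shop has weighted goods of " + str(weight) + "kg, items with " + str(volume) + " volume (mL) and " + str(quant) + " small items."
-- ===== SOURCE B (Python) =====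
-- def total_weight(ingLst):
--     weight = sum(x[1] for x in ingLst if x[2] == "kg")
--     volume = sum(x[1] for x in ingLst if x[2] == "mL")
--     quant = sum(x[1] for x in ingLst if x[2] not in ("kg", "mL"))
--     return "Shop has weighted goods of " + str(weight) + "kg, items with " + str(volume) + " volume (mL) and " + str(quant) + " small items."
-- ===== Notes on version B (the rewrite author's own statement) =====
-- stated objective: idiomatic
-- what changed: Replaces the single index-based accumulator loop with three independent filtered generator sums, one per unit category.
import Mathlib
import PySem

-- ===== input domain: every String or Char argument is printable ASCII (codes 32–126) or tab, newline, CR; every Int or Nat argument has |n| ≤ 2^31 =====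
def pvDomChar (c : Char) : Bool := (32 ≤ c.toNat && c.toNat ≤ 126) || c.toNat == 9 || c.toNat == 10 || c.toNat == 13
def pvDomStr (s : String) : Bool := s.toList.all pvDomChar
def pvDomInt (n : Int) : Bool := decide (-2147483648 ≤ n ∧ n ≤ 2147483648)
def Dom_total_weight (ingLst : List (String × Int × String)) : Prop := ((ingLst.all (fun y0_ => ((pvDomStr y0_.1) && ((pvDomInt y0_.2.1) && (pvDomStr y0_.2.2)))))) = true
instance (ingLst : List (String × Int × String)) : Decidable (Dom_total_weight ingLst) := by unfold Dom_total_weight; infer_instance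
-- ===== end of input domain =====

-- B replaces A's single three-accumulator index loop with three independent filtered sums (idiomatic decomposition; same O(n) cost).

-- ===== PORT A =====
def total_weight (ingLst : List (String × Int × String)) : String :=
  -- weight = 0; volume = 0; quant = 0; for i in range(len(ingLst)): …
  let s := (PySem.List.pyRange 0 (PySem.List.len ingLst) 1).foldl
    (fun (st : Int × Int × Int) i =>
      let x := PySem.List.pyGetD ingLst i ("", 0, "")
      if x.2.2 = "kg" then (st.1 + x.2.1, st.2.1, st.2.2)
      else if x.2.2 = "mL" then (st.1, st.2.1 + x.2.1, st.2.2)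
      else (st.1, st.2.1, st.2.2 + x.2.1)) (0, 0, 0)
  "Shop has weighted goods of " ++ PySem.Int.toStr s.1 ++ "kg, items with " ++
    PySem.Int.toStr s.2.1 ++ " volume (mL) and " ++ PySem.Int.toStr s.2.2 ++ " small items."

-- ===== PORT B =====
def total_weight_alt (ingLst : List (String × Int × String)) : String :=
  let weight := ((ingLst.filter (fun x => x.2.2 == "kg")).map (fun x => x.2.1)).sum
  let volume := ((ingLst.filter (fun x => x.2.2 == "mL")).map (fun x => x.2.1)).sum
  let quant := ((ingLst.filter (fun x => !(x.2.2 == "kg" || x.2.2 == "mL"))).map (fun x => x.2.1)).sum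
  "Shop has weighted goods of " ++ PySem.Int.toStr weight ++ "kg, items with " ++
    PySem.Int.toStr volume ++ " volume (mL) and " ++ PySem.Int.toStr quant ++ " small items."

-- ===== PRECONDITION & SPEC =====
def Spec_total_weight (ingLst : List (String × Int × String)) (out : String) : Prop := out = total_weight_alt ingLst
instance (ingLst : List (String × Int × String)) (out : String) : Decidable (Spec_total_weight ingLst out) := by unfold Spec_total_weight; infer_instance

-- ===== CLAIM (what is proved, stated in full; the proofs are below) =====
def Claim_equal_total_weight : Prop := ∀ (ingLst : List (String × Int × String)), Dom_total_weight ingLst → Spec_total_weight ingLst (total_weight ingLst)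

-- ===== LEMMAS AND PROOFS =====

-- A's combined loop computes the three filtered sums (each shifted by the accumulator).
theorem tw_foldl_eq (ingLst : List (String × Int × String)) (w v q : Int) :
    ingLst.foldl
      (fun (st : Int × Int × Int) x =>
        if x.2.2 = "kg" then (st.1 + x.2.1, st.2.1, st.2.2)
        else if x.2.2 = "mL" then (st.1, st.2.1 + x.2.1, st.2.2)
        else (st.1, st.2.1, st.2.2 + x.2.1)) (w, v, q) =
    (w + ((ingLst.filter (fun x => x.2.2 == "kg")).map (fun x => x.2.1)).sum,
     v + ((ingLst.filter (fun x => x.2.2 == "mL")).map (fun x => x.2.1)).sum,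
     q + ((ingLst.filter (fun x => !(x.2.2 == "kg" || x.2.2 == "mL"))).map (fun x => x.2.1)).sum) := by
  induction ingLst generalizing w v q with
  | nil => simp
  | cons x xs ih =>
    rw [List.foldl_cons]
    by_cases hk : x.2.2 = "kg"
    · rw [if_pos hk, ih]; simp [hk, add_assoc]
    · rw [if_neg hk]
      by_cases hm : x.2.2 = "mL"
      · rw [if_pos hm, ih]; simp [hm, add_assoc]
      · rw [if_neg hm, ih]; simp [hk, hm, add_assoc]

-- ===== VERDICT (by name: the statement is the Claim_ definition above) =====
theorem total_weight_spec : Claim_equal_total_weight := by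
  intro ingLst _
  show total_weight ingLst = total_weight_alt ingLst
  simp only [total_weight, total_weight_alt]
  have hfold := PySem.List.foldl_pyRange_pyGetD (xs := ingLst) (d := ("", 0, ""))
    (f := fun (st : Int × Int × Int) x =>
      if x.2.2 = "kg" then (st.1 + x.2.1, st.2.1, st.2.2)
      else if x.2.2 = "mL" then (st.1, st.2.1 + x.2.1, st.2.2)
      else (st.1, st.2.1, st.2.2 + x.2.1))
    (init := ((0 : Int), (0 : Int), (0 : Int))) (a := 0) (by omega)
  beta_reduce at hfold
  rw [hfold]
  simp [tw_foldl_eq]
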